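-- pv_equiv track=rewrite | github.com/aamelegy/Problems | codejam/2009/AllYourBase.py | solve
-- ===== SOURCE A (Python) =====
-- def solve(n):
--     s=0
--     j=dict()
--     for ch in n :
--         j[ch]=-1
--     b=max(len(j),2)
--     h=len(n)-1
--     s+=1*(b**h)
--     j[n[0]]=1
--     d=0
--     for i in range(1,len(n)):
--         h=len(n)-i-1
--         if j[n[i]]!=-1:
--             x=j[n[i]]
--         else:
--             x=d
--             j[n[i]]=d
--             d+=1
--             if d==1:
--                 d+=1
--         s+=x*(b**h)
--     return s
-- ===== SOURCE B (Python) =====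
-- def solve(n):
--     # Group-by-character evaluation: one back-to-front pass accumulates each
--     # character's total positional weight (sum of b**pos via a running power),
--     # then the answer is sum(digit(rank) * weight) over the distinct characters
--     # in first-occurrence order (rank 0 -> digit 1, rank 1 -> 0, rank r -> r).
--     order = list(dict.fromkeys(n))
--     b = max(len(order), 2)
--     weight = dict.fromkeys(order, 0)
--     pw = 1
--     for ch in reversed(n):
--         weight[ch] += pw
--         pw *= b
--     s = 0
--     for r, c in enumerate(order):
--         d = 1 if r == 0 else (0 if r == 1 else r)
--         s += d * weight[c]
--     return s
-- ===== Notes on version B (the rewrite author's own statement) =====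
-- stated objective: faster
-- what changed: B evaluates grouped by character instead of by position: a single back-to-front pass with a running power accumulates each character's total positional weight, and the result is the sum of digit(rank)*weight over the distinct characters in first-occurrence order (rank 0 -> 1, rank 1 -> 0, rank r -> r), replacing A's per-position digit assignment with b**h recomputed by pow at every position; Pre_ excludes the empty string, on which A raises IndexError (n[0]).
import Mathlib
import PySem

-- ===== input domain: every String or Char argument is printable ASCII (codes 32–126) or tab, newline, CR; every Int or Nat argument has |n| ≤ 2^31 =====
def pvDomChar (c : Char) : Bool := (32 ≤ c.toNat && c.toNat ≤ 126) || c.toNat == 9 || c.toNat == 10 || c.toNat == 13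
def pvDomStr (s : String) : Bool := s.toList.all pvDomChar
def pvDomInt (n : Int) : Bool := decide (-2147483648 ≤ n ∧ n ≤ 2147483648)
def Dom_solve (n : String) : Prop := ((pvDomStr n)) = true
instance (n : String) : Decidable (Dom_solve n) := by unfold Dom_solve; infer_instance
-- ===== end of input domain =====

-- B evaluates grouped by character: a back-to-front pass accumulates per-character
-- positional weights with a running power, then sums digit(rank)*weight over the
-- distinct characters, instead of A's per-position digits with b**h at each position.

-- ===== PORT A =====
-- A's loop body over i in range(1, len(n)); both .getD defaults are never used when
-- reached from solve: 1 ≤ i < len(n) keeps the index in range and every char of n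
-- was pre-inserted into j with value -1.
def stepA (cs : List Char) (b : Int) (st : Int × PySem.Dict Char Int × Int) (i : Int) :
    Int × PySem.Dict Char Int × Int :=
  let (s, j, d) := st
  let h : Nat := cs.length - i.toNat - 1                       -- h = len(n)-i-1
  let ch := (PySem.List.pyGet? cs i).getD ' '                  -- n[i]
  let x0 := j.getD ch (-1)                                     -- j[n[i]]
  if x0 ≠ -1 then (s + x0 * b ^ h, j, d)
  else
    let x := d
    let j' := j.insert ch d
    let d1 := d + 1
    let d2 := if d1 = 1 then d1 + 1 else d1                    -- d+=1; if d==1: d+=1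
    (s + x * b ^ h, j', d2)

def solve (n : String) : Int :=
  let cs := n.toList
  let j0 : PySem.Dict Char Int :=
    cs.foldl (fun j ch => j.insert ch (-1)) PySem.Dict.empty   -- for ch in n: j[ch] = -1
  let b : Int := max (j0.size : Int) 2                         -- b = max(len(j), 2)
  match PySem.List.pyGet? cs 0 with                            -- n[0]; none = IndexError ("" excluded by Pre_solve)
  | none => 0
  | some c0 =>
    let s0 : Int := 0 + 1 * b ^ (cs.length - 1)                -- s += 1*(b**h), h = len(n)-1
    let j1 := j0.insert c0 1                                   -- j[n[0]] = 1
    ((PySem.List.pyRange 1 (cs.length : Int) 1).foldl (stepA cs b) (s0, j1, 0)).1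

-- ===== PORT B =====
-- digit for first-occurrence rank r: 1, 0, 2, 3, 4, …
def digR (r : Int) : Int := if r = 0 then 1 else if r = 1 then 0 else r

-- body of 'for ch in reversed(n): weight[ch] += pw; pw *= b'
def stepW (b : Int) (st : PySem.Dict Char Int × Int) (ch : Char) :
    PySem.Dict Char Int × Int :=
  (st.1.modify ch 0 (· + st.2), st.2 * b)

def solve_alt (n : String) : Int :=
  let cs := n.toList
  let order := PySem.List.dedup cs                             -- list(dict.fromkeys(n))
  let b : Int := max ((order.length : Int)) 2
  let w0 : PySem.Dict Char Int :=
    order.foldl (fun d c => d.insert c 0) PySem.Dict.empty     -- dict.fromkeys(order, 0)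
  let fin := cs.reverse.foldl (stepW b) (w0, 1)
  -- weight[c] is always present (c ∈ order), so .getD's default is never used
  (PySem.List.enumerate order 0).foldl
    (fun s rc => s + digR rc.1 * fin.1.getD rc.2 0) 0

-- ===== PRECONDITION & SPEC =====
-- Pre_ excludes only the empty string, on which A raises IndexError at n[0].
def Pre_solve (n : String) : Prop := n.toList ≠ []
instance (n : String) : Decidable (Pre_solve n) := by unfold Pre_solve; infer_instance
def pvWitness_solve : String := "cats"

def Spec_solve (n : String) (out : Int) : Prop := out = solve_alt n
instance (n : String) (out : Int) : Decidable (Spec_solve n out) := by unfold Spec_solve; infer_instance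

-- ===== CLAIM (what is proved, stated in full; the proofs are below) =====
def Claim_equal_solve : Prop := ∀ (n : String), Dom_solve n → Pre_solve n → Spec_solve n (solve n)

-- ===== LEMMAS AND PROOFS =====

-- positional value of cs under digit map f in base b (the common meaning of both programs)
def posVal (b : Int) (f : Char → Int) : List Char → Int
  | [] => 0
  | c :: t => f c * b ^ t.length + posVal b f t

-- the same value read back-to-front (Horner from the last position)
def revVal (b : Int) (f : Char → Int) : List Char → Int
  | [] => 0
  | c :: t => f c + b * revVal b f t

lemma revVal_append_singleton (b : Int) (f : Char → Int) (l : List Char) (x : Char) :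
    revVal b f (l ++ [x]) = revVal b f l + f x * b ^ l.length := by
  induction l with
  | nil => simp [revVal]
  | cons y t ih => simp [revVal, ih]; ring

lemma posVal_eq_revVal_reverse (b : Int) (f : Char → Int) (cs : List Char) :
    posVal b f cs = revVal b f cs.reverse := by
  induction cs with
  | nil => rfl
  | cons c t ih =>
    simp [posVal, List.reverse_cons, revVal_append_singleton, ih]
    ring

-- A's indexed loop, rephrased structurally over the remaining suffix of the string.
def aLoop (b : Int) : List Char → Int × PySem.Dict Char Int × Int → Int × PySem.Dict Char Int × Int
  | [], st => st
  | ch :: suf, (s, j, d) =>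
      let x0 := j.getD ch (-1)
      if x0 ≠ -1 then aLoop b suf (s + x0 * b ^ suf.length, j, d)
      else
        let d1 := d + 1
        let d2 := if d1 = 1 then d1 + 1 else d1
        aLoop b suf (s + d * b ^ suf.length, j.insert ch d, d2)

-- A's foldl over range(k, len, 1) equals aLoop on the suffix cs.drop k.
lemma bridge (cs : List Char) (b : Int) :
    ∀ fuel k (s : Int) j d, cs.length - k ≤ fuel → k ≤ cs.length →
      (PySem.List.pyRange (k : Int) (cs.length : Int) 1).foldl (stepA cs b) (s, j, d)
        = aLoop b (cs.drop k) (s, j, d) := by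
  intro fuel
  induction fuel with
  | zero =>
    intro k s j d hf hk
    have hk' : k = cs.length := by omega
    subst hk'
    rw [PySem.List.pyRange_one_eq_nil (by omega), List.drop_length]
    rfl
  | succ m ih =>
    intro k s j d hf hk
    rcases Nat.eq_or_lt_of_le hk with heq | hlt
    · subst heq
      rw [PySem.List.pyRange_one_eq_nil (by omega), List.drop_length]
      rfl
    · rw [PySem.List.pyRange_one_cons (by exact_mod_cast hlt)]
      have hcast : (k : Int) + 1 = ((k + 1 : Nat) : Int) := by push_cast; ring
      rw [List.foldl_cons, hcast]
      have hch : (PySem.List.pyGet? cs (k : Int)).getD ' ' = cs[k] := by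
        simp [List.getElem?_eq_getElem hlt]
      have hdrop : cs.drop k = cs[k] :: cs.drop (k + 1) := List.drop_eq_getElem_cons hlt
      rw [hdrop]
      have hexp : cs.length - (k : Int).toNat - 1 = (cs.drop (k + 1)).length := by
        rw [List.length_drop, Int.toNat_natCast]; omega
      by_cases hx : j.getD cs[k] (-1) ≠ -1
      · have hstep : stepA cs b (s, j, d) (k : Int)
            = (s + j.getD cs[k] (-1) * b ^ (cs.drop (k + 1)).length, j, d) := by
          simp only [stepA, hch, hexp, if_pos hx]
        rw [hstep, ih (k + 1) _ _ _ (by omega) (by omega)]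
        conv_rhs => rw [aLoop]
        simp only [if_pos hx]
      · have hstep : stepA cs b (s, j, d) (k : Int)
            = (s + d * b ^ (cs.drop (k + 1)).length, j.insert cs[k] d,
               if d + 1 = 1 then d + 1 + 1 else d + 1) := by
          simp only [stepA, hch, hexp, if_neg hx]
        rw [hstep, ih (k + 1) _ _ _ (by omega) (by omega)]
        conv_rhs => rw [aLoop]
        simp only [if_neg hx]

lemma digR_natCast_nonneg (r : Nat) : 0 ≤ digR (r : Int) := by
  unfold digR; split_ifs <;> omega

lemma digR_succ (L : Nat) (h : 1 ≤ L) :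
    (if digR (L : Int) + 1 = 1 then digR (L : Int) + 1 + 1 else digR (L : Int) + 1)
      = digR ((L + 1 : Nat) : Int) := by
  unfold digR
  rcases Nat.eq_or_lt_of_le h with h1 | h2
  · subst h1; norm_num
  · have : (2 : Nat) ≤ L := h2
    push_cast
    split_ifs <;> omega

-- (seen ++ [ch]).idxOf ch = seen.length when ch is new
lemma idxOf_append_self (l : List Char) (a : Char) (h : a ∉ l) :
    (l ++ [a]).idxOf a = l.length := by
  induction l with
  | nil => simp
  | cons y t ih =>
    have hy : a ≠ y := fun he => h (he ▸ List.mem_cons_self)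
    have ht : a ∉ t := fun he => h (List.mem_cons_of_mem _ he)
    rw [List.cons_append, List.idxOf_cons_ne _ (Ne.symm hy), ih ht, List.length_cons]

-- A's loop computes the positional value of the suffix under the global rank digits.
lemma A_sim (b : Int) (order : List Char) :
    ∀ (suf seen : List Char) (s : Int) (j : PySem.Dict Char Int),
      seen ≠ [] → seen.Nodup →
      order = PySem.Set.update seen suf →
      (∀ c, j.getD c (-1) = if c ∈ seen then digR (seen.idxOf c : Int) else -1) →
      (aLoop b suf (s, j, digR (seen.length : Int))).1
        = s + posVal b (fun c => digR ((order.idxOf c : Nat) : Int)) suf := by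
  intro suf
  induction suf with
  | nil =>
    intro seen s j _ _ _ _
    simp [aLoop, posVal]
  | cons ch suf ih =>
    intro seen s j hne hnd horder hj
    by_cases hm : ch ∈ seen
    · -- ch already seen: then-branch, map unchanged
      have hx : j.getD ch (-1) = digR ((seen.idxOf ch : Nat) : Int) := by
        rw [hj ch, if_pos hm]
      have hxne : j.getD ch (-1) ≠ -1 := by
        rw [hx]
        have := digR_natCast_nonneg (seen.idxOf ch)
        omega
      conv_lhs => rw [aLoop]
      simp only [if_pos hxne]
      have horder' : order = PySem.Set.update seen suf := by
        rw [horder, PySem.Set.update_cons, PySem.Set.add_of_mem hm]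
      rw [ih seen _ _ hne hnd horder' hj]
      obtain ⟨t, ht⟩ : ∃ t, order = seen ++ t :=
        ⟨_, by rw [horder', PySem.Set.update_eq_append_filter]⟩
      have hidx : order.idxOf ch = seen.idxOf ch := by
        rw [ht, List.idxOf_append_of_mem hm]
      rw [posVal, hx, hidx]
      ring
    · -- first occurrence: else-branch, ch gets digit digR(seen.length)
      have hx : j.getD ch (-1) = -1 := by rw [hj ch, if_neg hm]
      have hxne : ¬ j.getD ch (-1) ≠ -1 := by simp [hx]
      conv_lhs => rw [aLoop]
      rw [if_neg hxne]
      show (aLoop b suf (s + digR (seen.length : Int) * b ^ suf.length,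
          j.insert ch (digR (seen.length : Int)),
          if digR (seen.length : Int) + 1 = 1 then digR (seen.length : Int) + 1 + 1
          else digR (seen.length : Int) + 1)).1 = _
      have hL : 1 ≤ seen.length := List.length_pos_of_ne_nil hne
      have hnd' : (seen ++ [ch]).Nodup := by
        simp [List.nodup_append, hnd]
        exact fun a ha hac => hm (hac ▸ ha)
      have horder' : order = PySem.Set.update (seen ++ [ch]) suf := by
        rw [horder, PySem.Set.update_cons, PySem.Set.add_of_not_mem hm]
      have hlen' : (seen ++ [ch]).length = seen.length + 1 := by simp
      have hd2 : (if digR (seen.length : Int) + 1 = 1 then digR (seen.length : Int) + 1 + 1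
          else digR (seen.length : Int) + 1) = digR (((seen ++ [ch]).length : Nat) : Int) := by
        rw [hlen']
        exact digR_succ seen.length hL
      have hj' : ∀ c, (j.insert ch (digR (seen.length : Int))).getD c (-1)
          = if c ∈ seen ++ [ch] then digR (((seen ++ [ch]).idxOf c : Nat) : Int) else -1 := by
        intro c
        rw [PySem.Dict.getD_insert]
        by_cases hc : c = ch
        · subst hc
          rw [if_pos rfl, if_pos (by simp), idxOf_append_self seen c hm]
        · rw [if_neg hc, hj c]
          by_cases hcs : c ∈ seen
          · rw [if_pos hcs, if_pos (by simp [hcs]), List.idxOf_append_of_mem hcs]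
          · rw [if_neg hcs, if_neg (by simp [hcs, hc])]
      rw [hd2, ih (seen ++ [ch]) _ _ (by simp) hnd' horder' hj']
      obtain ⟨t, ht⟩ : ∃ t, order = (seen ++ [ch]) ++ t :=
        ⟨_, by rw [horder', PySem.Set.update_eq_append_filter]⟩
      have hidx : order.idxOf ch = seen.length := by
        rw [ht, List.idxOf_append_of_mem (by simp), idxOf_append_self seen ch hm]
      rw [posVal, hidx]
      ring

-- weights start at 0 everywhere
lemma getD_fromkeys_zero (l : List Char) :
    ∀ (w : PySem.Dict Char Int), (∀ c, w.getD c 0 = 0) →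
      ∀ c, (l.foldl (fun d c => d.insert c 0) w).getD c 0 = 0 := by
  induction l with
  | nil => intro w h c; simpa using h c
  | cons x l ih =>
    intro w h c
    refine ih _ (fun c' => ?_) c
    rw [PySem.Dict.getD_insert]
    split
    · rfl
    · exact h c'

-- adding δ at the single key x shifts the rank-weighted sum by digR(rank of x) * δ
lemma sum_enum_indicator (x : Char) (δ : Int) :
    ∀ (ord : List Char) (s : Int) (f : Char → Int), ord.Nodup → x ∈ ord →
      ((PySem.List.enumerate ord s).map
          (fun p => digR p.1 * (if p.2 = x then f p.2 + δ else f p.2))).sum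
        = ((PySem.List.enumerate ord s).map (fun p => digR p.1 * f p.2)).sum
          + digR (s + (ord.idxOf x : Int)) * δ := by
  intro ord
  induction ord with
  | nil => intro s f _ hx; simp at hx
  | cons y t ih =>
    intro s f hnd hx
    rw [PySem.List.enumerate_cons]
    simp only [List.map_cons, List.sum_cons]
    by_cases hxy : y = x
    · rw [hxy]
      have hxt : x ∉ t := hxy ▸ (List.nodup_cons.mp hnd).1
      have htail : ((PySem.List.enumerate t (s + 1)).map
            (fun p => digR p.1 * (if p.2 = x then f p.2 + δ else f p.2))).sum
          = ((PySem.List.enumerate t (s + 1)).map (fun p => digR p.1 * f p.2)).sum := by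
        congr 1
        apply List.map_congr_left
        intro p hp
        obtain ⟨k, hk, hpk⟩ := (PySem.List.mem_enumerate_iff _ _ _).mp hp
        subst hpk
        have : t[k] ≠ x := fun he => hxt (he ▸ List.getElem_mem hk)
        simp [this]
      rw [htail, List.idxOf_cons_self]
      simp only [Nat.cast_zero, add_zero, if_true]
      ring
    · have hx' : x ∈ t := by
        rcases List.mem_cons.mp hx with h | h
        · exact absurd h.symm hxy
        · exact h
      rw [ih (s + 1) f (List.nodup_cons.mp hnd).2 hx']
      have hyx : (if y = x then f y + δ else f y) = f y := if_neg hxy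
      rw [hyx, List.idxOf_cons_ne t hxy]
      have hcast : (s + ((t.idxOf x + 1 : Nat) : Int)) = (s + 1 + (t.idxOf x : Int)) := by
        push_cast; ring
      rw [hcast]
      ring

-- the reversed weight pass adds pw * revVal of the processed list
lemma B_sim (b : Int) (order : List Char) (hnd : order.Nodup) :
    ∀ (l : List Char) (w : PySem.Dict Char Int) (pw : Int),
      (∀ c ∈ l, c ∈ order) →
      ((PySem.List.enumerate order 0).map
          (fun p => digR p.1 * ((l.foldl (stepW b) (w, pw)).1.getD p.2 0))).sum
        = ((PySem.List.enumerate order 0).map (fun p => digR p.1 * w.getD p.2 0)).sum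
          + pw * revVal b (fun c => digR ((order.idxOf c : Nat) : Int)) l := by
  intro l
  induction l with
  | nil =>
    intro w pw _
    simp [revVal]
  | cons ch l ih =>
    intro w pw hmem
    rw [List.foldl_cons]
    have hstep : stepW b (w, pw) ch = (w.modify ch 0 (· + pw), pw * b) := rfl
    rw [hstep, ih _ _ (fun c hc => hmem c (List.mem_cons_of_mem _ hc))]
    have hmod : ((PySem.List.enumerate order 0).map
          (fun p => digR p.1 * ((w.modify ch 0 (· + pw)).getD p.2 0))).sum
        = ((PySem.List.enumerate order 0).map
          (fun p => digR p.1 * (if p.2 = ch then w.getD p.2 0 + pw else w.getD p.2 0))).sum := by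
      congr 1
      apply List.map_congr_left
      intro p _
      rw [PySem.Dict.getD_modify]
      by_cases hc : p.2 = ch
      · rw [if_pos hc, if_pos hc, hc]
      · rw [if_neg hc, if_neg hc]
    rw [hmod, sum_enum_indicator ch pw order 0 (fun c => w.getD c 0) hnd
      (hmem ch List.mem_cons_self)]
    rw [revVal]
    simp only [zero_add]
    ring

lemma size_eq_keys_length (d : PySem.Dict Char Int) : d.size = d.keys.length := by
  simp [PySem.Dict.size, PySem.Dict.keys]

-- The dictionary built by pre-inserting -1 for every char maps everything to -1 under default -1.
lemma getD_preinsert (l : List Char) :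
    ∀ (j : PySem.Dict Char Int), (∀ c, j.getD c (-1) = -1) →
      ∀ c, (l.foldl (fun j ch => j.insert ch (-1)) j).getD c (-1) = -1 := by
  induction l with
  | nil => intro j h c; simpa using h c
  | cons ch l ih =>
    intro j h c
    refine ih _ (fun c' => ?_) c
    rw [PySem.Dict.getD_insert]
    split
    · rfl
    · exact h c'

-- ===== VERDICT (by name: the statement is the Claim_ definition above) =====
theorem solve_spec : Claim_equal_solve := by
  intro n _ hpre
  unfold Spec_solve solve solve_alt
  obtain ⟨c0, rest, hcs⟩ : ∃ c0 rest, n.toList = c0 :: rest := by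
    cases h : n.toList with
    | nil => exact absurd h hpre
    | cons a l => exact ⟨a, l, rfl⟩
  rw [hcs]
  simp only [PySem.List.pyGet?_zero_cons]
  set cs := c0 :: rest with hcsdef
  set order := PySem.List.dedup cs with horder
  set j0 : PySem.Dict Char Int :=
    cs.foldl (fun j ch => j.insert ch (-1)) PySem.Dict.empty with hj0
  have hndo : order.Nodup := by
    rw [horder, PySem.List.dedup_eq_ofList]; apply PySem.Set.nodup_ofList
  have hkeys : j0.keys = order := by
    rw [hj0, PySem.Dict.keys_foldl_insert, PySem.Dict.keys_empty,
      PySem.Set.update_nil_left, horder, PySem.List.dedup_eq_ofList]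
  have hsize : j0.size = order.length := by rw [size_eq_keys_length, hkeys]
  rw [hsize]
  set b : Int := max ((order.length : Nat) : Int) 2 with hb
  -- A side equals the positional value of cs under the rank digits
  have hA : ((PySem.List.pyRange 1 (cs.length : Int) 1).foldl (stepA cs b)
      (0 + 1 * b ^ (cs.length - 1), j0.insert c0 1, 0)).1
        = posVal b (fun c => digR ((order.idxOf c : Nat) : Int)) cs := by
    have h1 : ((1 : Nat) : Int) = (1 : Int) := by norm_num
    have hbr := bridge cs b cs.length 1 (0 + 1 * b ^ (cs.length - 1))
      (j0.insert c0 1) 0 (by omega) (by simp [hcsdef])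
    rw [h1] at hbr
    rw [hbr]
    have hdrop : cs.drop 1 = rest := by simp [hcsdef]
    rw [hdrop]
    have hj1 : ∀ c, (j0.insert c0 1).getD c (-1)
        = if c ∈ [c0] then digR (([c0].idxOf c : Nat) : Int) else -1 := by
      intro c
      rw [PySem.Dict.getD_insert]
      by_cases hc : c = c0
      · subst hc; simp [List.idxOf_cons_self, digR]
      · rw [if_neg hc, if_neg (by simp [hc])]
        exact getD_preinsert cs PySem.Dict.empty
          (fun c' => PySem.Dict.getD_empty c' (-1)) c
    have hupd : order = PySem.Set.update [c0] rest := by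
      rw [horder, hcsdef, PySem.List.dedup_eq_ofList]
      rfl
    have hAsim := A_sim b order rest [c0] (0 + 1 * b ^ (cs.length - 1))
      (j0.insert c0 1) (by simp) (by simp) hupd hj1
    have h01 : digR ((List.length [c0] : Nat) : Int) = 0 := by norm_num [digR]
    rw [h01] at hAsim
    rw [hAsim]
    have hc0 : order.idxOf c0 = 0 := by
      rw [horder, hcsdef, PySem.List.dedup_eq_ofList, PySem.Set.ofList_cons]
      exact List.idxOf_cons_self
    rw [hcsdef, posVal, hc0]
    have hlen : (c0 :: rest).length - 1 = rest.length := by simp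
    rw [hlen]
    norm_num [digR]
  rw [hA]
  -- B side equals the same positional value
  rw [PySem.List.foldl_add]
  have hw0 : ∀ c, (order.foldl (fun d c => d.insert c 0)
      (PySem.Dict.empty : PySem.Dict Char Int)).getD c 0 = 0 :=
    getD_fromkeys_zero order PySem.Dict.empty (fun c => PySem.Dict.getD_empty c 0)
  rw [B_sim b order hndo cs.reverse _ 1
    (fun c hc => by rw [horder]; exact (PySem.List.mem_dedup _ _).mpr (List.mem_reverse.mp hc))]
  have hzero : ((PySem.List.enumerate order 0).map
      (fun p => digR p.1
        * (order.foldl (fun d c => d.insert c 0) PySem.Dict.empty).getD p.2 0)).sum = 0 := by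
    apply List.sum_eq_zero
    intro x hx
    obtain ⟨p, hp, rfl⟩ := List.mem_map.mp hx
    rw [hw0 p.2, mul_zero]
  rw [hzero, one_mul, ← posVal_eq_revVal_reverse]
  simp
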